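-- pv_equiv track=rewrite | github.com/nyomangedar/sidewalk_od | backend/boundingbox_processing.py | answer_with_name
-- ===== SOURCE A (Python) =====
-- def answer_with_name(list):
--     ans = ""
--     for i in range(len(list)):
--         position = list[i][0]
--         object_name = list[i][1]
--         if i == len(list)-1:
--             ans += object_name + " on your " + position
--         else:
--             ans += object_name + " on your " + position + " and "
--     return ans
-- ===== SOURCE B (Python) =====
-- def answer_with_name(list):
--     if not list:
--         return ""
--     position = list[0][0]
--     object_name = list[0][1]
--     piece = object_name + " on your " + position
--     if len(list) == 1:
--         return piece
--     return piece + " and " + answer_with_name(list[1:])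
-- ===== Notes on version B (the rewrite author's own statement) =====
-- stated objective: alternative
-- what changed: Replaces A's index-driven loop with its last-element branch and string accumulator by direct structural recursion on the list: format the head pair and recurse on the tail, appending the separator only when a tail exists.
import Mathlib
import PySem

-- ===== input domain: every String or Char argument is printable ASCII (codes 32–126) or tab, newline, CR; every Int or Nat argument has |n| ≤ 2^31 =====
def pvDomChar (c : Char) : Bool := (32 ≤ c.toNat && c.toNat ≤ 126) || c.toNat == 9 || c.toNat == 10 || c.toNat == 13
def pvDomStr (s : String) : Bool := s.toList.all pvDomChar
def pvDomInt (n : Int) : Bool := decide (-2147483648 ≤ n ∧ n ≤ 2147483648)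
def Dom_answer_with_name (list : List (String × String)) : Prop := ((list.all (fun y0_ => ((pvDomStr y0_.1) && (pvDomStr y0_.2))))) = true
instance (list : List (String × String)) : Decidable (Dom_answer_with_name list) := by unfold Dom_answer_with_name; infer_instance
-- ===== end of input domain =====

-- B replaces A's index-driven accumulator loop (with its last-element branch) by
-- structural recursion on the list: format the head, recurse on the tail (alternative, same cost).

-- ===== PORT A =====
-- A's loop never indexes out of range, so pyGetD's default is unreachable.
def answer_with_name (list : List (String × String)) : String :=
  (PySem.List.pyRange 0 (list.length : Int) 1).foldl
    (fun ans i =>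
      let pair := PySem.List.pyGetD list i ("", "")
      let position := pair.1
      let object_name := pair.2
      if i = (list.length : Int) - 1 then
        ans ++ (object_name ++ " on your " ++ position)
      else
        ans ++ (object_name ++ " on your " ++ position ++ " and "))
    ""

-- ===== PORT B =====
def answer_with_name_alt : List (String × String) → String
  | [] => ""
  | p :: rest =>
      let position := p.1
      let object_name := p.2
      let piece := object_name ++ " on your " ++ position
      if rest = [] then piece
      else piece ++ " and " ++ answer_with_name_alt rest

-- ===== PRECONDITION & SPEC =====
def Spec_answer_with_name (list : List (String × String)) (out : String) : Prop := out = answer_with_name_alt list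
instance (list : List (String × String)) (out : String) : Decidable (Spec_answer_with_name list out) := by unfold Spec_answer_with_name; infer_instance

-- ===== CLAIM (what is proved, stated in full; the proofs are below) =====
def Claim_equal_answer_with_name : Prop := ∀ (list : List (String × String)), Dom_answer_with_name list → Spec_answer_with_name list (answer_with_name list)

-- ===== LEMMAS AND PROOFS =====

theorem alt_cons_of_ne (p : String × String) (rest : List (String × String)) (h : rest ≠ []) :
    answer_with_name_alt (p :: rest) = p.2 ++ " on your " ++ p.1 ++ " and " ++ answer_with_name_alt rest := by
  cases rest with
  | nil => exact absurd rfl h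
  | cons q t => rfl

theorem alt_singleton (p : String × String) :
    answer_with_name_alt [p] = p.2 ++ " on your " ++ p.1 := rfl

-- The tail of A's loop, from index k on, appends exactly B's recursion on the remaining suffix.
theorem answer_loop_eq (l : List (String × String)) (k : Nat) (acc : String) :
    (PySem.List.pyRange (k : Int) (l.length : Int) 1).foldl
      (fun ans i =>
        let pair := PySem.List.pyGetD l i ("", "")
        if i = (l.length : Int) - 1 then
          ans ++ (pair.2 ++ " on your " ++ pair.1)
        else
          ans ++ (pair.2 ++ " on your " ++ pair.1 ++ " and "))
      acc
    = acc ++ answer_with_name_alt (l.drop k) := by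
  rcases Nat.lt_or_ge k l.length with hlt | hge
  · rw [PySem.List.pyRange_one_cons (by exact_mod_cast hlt)]
    simp only [List.foldl_cons]
    have hget : PySem.List.pyGetD l (k : Int) ("", "") = l[k] := by
      rw [PySem.List.pyGetD_natCast]; exact List.getD_eq_getElem _ _ hlt
    have hdrop : l.drop k = l[k] :: l.drop (k + 1) := List.drop_eq_getElem_cons hlt
    by_cases hlast : (k : Int) = (l.length : Int) - 1
    · have : ((k : Int) + 1) = (l.length : Int) := by omega
      rw [if_pos hlast, this, PySem.List.pyRange_one_eq_nil (le_refl _)]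
      have hnil : l.drop (k + 1) = [] := List.drop_eq_nil_of_le (by omega)
      simp [hget, hdrop, hnil, alt_singleton]
    · have step := answer_loop_eq l (k + 1) (acc ++ (l[k].2 ++ " on your " ++ l[k].1 ++ " and "))
      rw [if_neg hlast]
      have hc : ((k : Int) + 1) = ((k + 1 : Nat) : Int) := by push_cast; ring
      simp only [hget]
      rw [hc]
      have hne : l.drop (k + 1) ≠ [] := by
        intro h
        have := List.drop_eq_nil_iff.mp h
        omega
      refine step.trans ?_
      rw [hdrop, alt_cons_of_ne _ _ hne]
      simp [String.append_assoc]
  · rw [PySem.List.pyRange_one_eq_nil (by exact_mod_cast hge),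
      List.drop_eq_nil_of_le hge]
    simp [answer_with_name_alt]
termination_by l.length - k

-- ===== VERDICT (by name: the statement is the Claim_ definition above) =====
theorem answer_with_name_spec : Claim_equal_answer_with_name := by
  intro l _hd
  unfold Spec_answer_with_name answer_with_name
  simpa using answer_loop_eq l 0 ""
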